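-- pv_equiv track=rewrite | github.com/lytvynenkomaksim/CS336-assignment1-basics | cs336_basics/BPE.py | _merge_word_with_index
-- ===== SOURCE A (Python) =====
-- def _merge_word_with_index(word: tuple, best_pair: tuple, new_token_id: int) -> tuple[tuple, list, list]:
--     byte_1, byte_2 = best_pair
--
--     new_word = []
--     old_pairs = []
--     new_pairs = []
--
--     i = 0
--     while i < len(word):
--         if i < len(word) - 1 and (word[i], word[i + 1]) == best_pair:
--             # Found the pair to merge!
--
--             # If there's a token before, the pair (prev, byte_1) becomes (prev, new_token_id)
--             if i > 0:
--                 old_pairs.append((word[i - 1], byte_1))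
--                 new_pairs.append((word[i - 1], new_token_id))
--
--             # If there's a token after, the pair (byte_2, next) becomes (new_token_id, next)
--             if i + 2 < len(word):
--                 old_pairs.append((byte_2, word[i + 2]))
--                 new_pairs.append((new_token_id, word[i + 2]))
--
--             # Add the merged token
--             new_word.append(new_token_id)
--             i += 2  # Skip both bytes of the merged pair
--         else:
--             new_word.append(word[i])
--             i += 1
--
--     return tuple(new_word), old_pairs, new_pairs
-- ===== SOURCE B (Python) =====
-- def _merge_word_with_index(word: tuple, best_pair: tuple, new_token_id: int) -> tuple[tuple, list, list]:
--     byte_1, byte_2 = best_pair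
--     n = len(word)
--
--     # Pass 1: greedy left-to-right choice of merge start positions (a chosen
--     # position disqualifies the immediately following index).
--     positions = []
--     last = -2
--     for j in range(n - 1):
--         if j > last + 1 and word[j] == byte_1 and word[j + 1] == byte_2:
--             positions.append(j)
--             last = j
--
--     # Pass 2: the merged word is the concatenation of the untouched segments
--     # between chosen positions, with the new token in place of each pair.
--     new_word = []
--     prev = 0
--     for p in positions:
--         new_word.extend(word[prev:p])
--         new_word.append(new_token_id)
--         prev = p + 2
--     new_word.extend(word[prev:])
--
--     # Pass 3: pair deltas, read off the ORIGINAL word's neighbours.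
--     old_pairs = []
--     new_pairs = []
--     for p in positions:
--         if p > 0:
--             old_pairs.append((word[p - 1], byte_1))
--             new_pairs.append((word[p - 1], new_token_id))
--         if p + 2 < n:
--             old_pairs.append((byte_2, word[p + 2]))
--             new_pairs.append((new_token_id, word[p + 2]))
--
--     return tuple(new_word), old_pairs, new_pairs
-- ===== Notes on version B (the rewrite author's own statement) =====
-- stated objective: alternative
-- what changed: A's single fused while-loop that builds new_word, old_pairs and new_pairs as it scans is replaced by a multi-pass decomposition: one pass over all indices with a 'last merged' marker collects the merge start positions, then new_word is built by concatenating the untouched slices between positions, and the pair deltas are emitted in a separate loop over the positions reading neighbours from the original word.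
import Mathlib
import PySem

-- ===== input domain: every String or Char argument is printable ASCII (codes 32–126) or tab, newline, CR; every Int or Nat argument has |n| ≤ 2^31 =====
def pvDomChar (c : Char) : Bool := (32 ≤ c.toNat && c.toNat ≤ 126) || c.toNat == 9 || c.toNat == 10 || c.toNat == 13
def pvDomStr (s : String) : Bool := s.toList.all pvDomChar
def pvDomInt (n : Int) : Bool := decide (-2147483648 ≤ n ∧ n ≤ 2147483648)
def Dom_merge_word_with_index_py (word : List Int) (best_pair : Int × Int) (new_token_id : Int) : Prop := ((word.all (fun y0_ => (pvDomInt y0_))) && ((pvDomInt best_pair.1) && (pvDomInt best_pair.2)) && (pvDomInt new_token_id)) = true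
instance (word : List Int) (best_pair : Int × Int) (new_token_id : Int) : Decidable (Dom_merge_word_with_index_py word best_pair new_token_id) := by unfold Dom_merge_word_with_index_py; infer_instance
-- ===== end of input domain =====

-- B re-decomposes A's single fused scan into three passes (collect merge positions,
-- concatenate untouched segments, emit pair deltas); objective: alternative, same cost.

-- ===== PORT A =====
-- A's single while-loop: the triple (new_word, old_pairs, new_pairs) produced by the
-- loop from index i, built head-first.  `fuel` is only the termination measure (the
-- loop runs at most word.length iterations; called with fuel = word.length, and
-- word.length - i ≤ fuel throughout).  Every index is in range where read, so
-- List.getD is exact for word[_].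
def aLoop (word : List Int) (b1 b2 nt : Int) :
    Nat → Nat → List Int × (List (Int × Int)) × (List (Int × Int))
  | 0, _ => ([], [], [])
  | fuel+1, i =>
    if i < word.length then
      if i + 1 < word.length ∧ word.getD i 0 = b1 ∧ word.getD (i+1) 0 = b2 then
        let rest := aLoop word b1 b2 nt fuel (i+2)
        (nt :: rest.1,
         (if 0 < i then [(word.getD (i-1) 0, b1)] else []) ++
           (if i + 2 < word.length then [(b2, word.getD (i+2) 0)] else []) ++ rest.2.1,
         (if 0 < i then [(word.getD (i-1) 0, nt)] else []) ++
           (if i + 2 < word.length then [(nt, word.getD (i+2) 0)] else []) ++ rest.2.2)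
      else
        let rest := aLoop word b1 b2 nt fuel (i+1)
        (word.getD i 0 :: rest.1, rest.2.1, rest.2.2)
    else ([], [], [])

def merge_word_with_index_py (word : List Int) (best_pair : Int × Int) (new_token_id : Int) : List Int × (List (Int × Int)) × (List (Int × Int)) :=
  aLoop word best_pair.1 best_pair.2 new_token_id word.length 0

-- ===== PORT B =====
-- Pass 1: for j in range(n-1) with the `last` marker; chosen j requires j > last + 1.
-- `fuel` is only the termination measure (the scan visits each j once; called with
-- fuel = word.length).
def bPositions (word : List Int) (b1 b2 : Int) :
    Nat → Nat → Int → List Nat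
  | 0, _, _ => []
  | fuel+1, j, last =>
    if j + 1 < word.length then
      if (j : Int) > last + 1 ∧ word.getD j 0 = b1 ∧ word.getD (j+1) 0 = b2 then
        j :: bPositions word b1 b2 fuel (j+1) (j : Int)
      else
        bPositions word b1 b2 fuel (j+1) last
    else []

-- Pass 2: concatenation of untouched segments word[prev:p] with nt between them,
-- then the tail word[prev:]  (slices of in-range nonnegative bounds = take/drop).
def bNewWord (word : List Int) (nt : Int) (ps : List Nat) (prev : Nat) : List Int :=
  match ps with
  | [] => word.drop prev
  | p :: rest => (word.drop prev).take (p - prev) ++ nt :: bNewWord word nt rest (p + 2)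

-- Pass 3: pair deltas from the ORIGINAL word's neighbours.
def bPairs (word : List Int) (b1 b2 nt : Int) (ps : List Nat) :
    (List (Int × Int)) × (List (Int × Int)) :=
  match ps with
  | [] => ([], [])
  | p :: rest =>
    let r := bPairs word b1 b2 nt rest
    ((if 0 < p then [(word.getD (p-1) 0, b1)] else []) ++
       (if p + 2 < word.length then [(b2, word.getD (p+2) 0)] else []) ++ r.1,
     (if 0 < p then [(word.getD (p-1) 0, nt)] else []) ++
       (if p + 2 < word.length then [(nt, word.getD (p+2) 0)] else []) ++ r.2)

def merge_word_with_index_py_alt (word : List Int) (best_pair : Int × Int) (new_token_id : Int) : List Int × (List (Int × Int)) × (List (Int × Int)) :=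
  let ps := bPositions word best_pair.1 best_pair.2 word.length 0 (-2)
  (bNewWord word new_token_id ps 0,
   bPairs word best_pair.1 best_pair.2 new_token_id ps)

-- ===== PRECONDITION & SPEC =====
def Spec_merge_word_with_index_py (word : List Int) (best_pair : Int × Int) (new_token_id : Int) (out : List Int × (List (Int × Int)) × (List (Int × Int))) : Prop := out = merge_word_with_index_py_alt word best_pair new_token_id
instance (word : List Int) (best_pair : Int × Int) (new_token_id : Int) (out : List Int × (List (Int × Int)) × (List (Int × Int))) : Decidable (Spec_merge_word_with_index_py word best_pair new_token_id out) := by unfold Spec_merge_word_with_index_py; infer_instance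

-- ===== CLAIM (what is proved, stated in full; the proofs are below) =====
def Claim_equal_merge_word_with_index_py : Prop := ∀ (word : List Int) (best_pair : Int × Int) (new_token_id : Int), Dom_merge_word_with_index_py word best_pair new_token_id → Spec_merge_word_with_index_py word best_pair new_token_id (merge_word_with_index_py word best_pair new_token_id)

-- ===== LEMMAS AND PROOFS =====

-- The scan is empty as soon as j+1 is out of range.
lemma bPositions_nil (word : List Int) (b1 b2 : Int) (f j : Nat) (last : Int)
    (h : ¬ j + 1 < word.length) : bPositions word b1 b2 f j last = [] := by
  cases f with
  | zero => rfl
  | succ g => rw [bPositions, if_neg h]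

-- Any fuel ≥ the remaining scan length gives the same positions.
lemma bPositions_fuel (word : List Int) (b1 b2 : Int) :
    ∀ f f' j (last : Int), word.length - j ≤ f → word.length - j ≤ f' →
      bPositions word b1 b2 f j last = bPositions word b1 b2 f' j last := by
  intro f
  induction f with
  | zero =>
    intro f' j last hf hf'
    rw [bPositions_nil word b1 b2 0 j last (by omega),
        bPositions_nil word b1 b2 f' j last (by omega)]
  | succ g ih =>
    intro f' j last hf hf'
    by_cases hj : j + 1 < word.length
    · cases f' with
      | zero => omega
      | succ g' =>
        rw [bPositions, bPositions, if_pos hj, if_pos hj]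
        by_cases hc : (j : Int) > last + 1 ∧ word.getD j 0 = b1 ∧ word.getD (j+1) 0 = b2
        · rw [if_pos hc, if_pos hc, ih g' (j+1) (j : Int) (by omega) (by omega)]
        · rw [if_neg hc, if_neg hc, ih g' (j+1) last (by omega) (by omega)]
    · rw [bPositions_nil word b1 b2 _ j last hj, bPositions_nil word b1 b2 f' j last hj]

-- The `last` marker only matters through `last + 1 < j`.
lemma bPositions_irrel (word : List Int) (b1 b2 : Int) :
    ∀ f (j : Nat) (last last' : Int), last + 1 < (j : Int) → last' + 1 < (j : Int) →
      bPositions word b1 b2 f j last = bPositions word b1 b2 f j last' := by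
  intro f
  induction f with
  | zero => intro j last last' _ _; rfl
  | succ g ih =>
    intro j last last' h1 h2
    rw [bPositions, bPositions]
    by_cases hj : j + 1 < word.length
    · rw [if_pos hj, if_pos hj]
      by_cases hp : word.getD j 0 = b1 ∧ word.getD (j+1) 0 = b2
      · rw [if_pos ⟨by omega, hp⟩, if_pos ⟨by omega, hp⟩]
      · rw [if_neg (by tauto), if_neg (by tauto)]
        exact ih (j+1) last last' (by push_cast; omega) (by push_cast; omega)
    · rw [if_neg hj, if_neg hj]

-- Every chosen position is ≥ the scan start.
lemma bPositions_ge (word : List Int) (b1 b2 : Int) :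
    ∀ f j (last : Int), ∀ p ∈ bPositions word b1 b2 f j last, j ≤ p := by
  intro f
  induction f with
  | zero => intro j last p hp; simp [bPositions] at hp
  | succ g ih =>
    intro j last p hp
    rw [bPositions] at hp
    by_cases hj : j + 1 < word.length
    · rw [if_pos hj] at hp
      split_ifs at hp with hc
      · rcases List.mem_cons.mp hp with rfl | hp'
        · exact le_refl _
        · have := ih (j+1) (j : Int) p hp'
          omega
      · have := ih (j+1) last p hp
        omega
    · rw [if_neg hj] at hp
      simp at hp

-- One untouched token peels off the front of B's segment concatenation.
lemma bNewWord_step (word : List Int) (nt : Int) (ps : List Nat) (i : Nat)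
    (hi : i < word.length) (hge : ∀ p ∈ ps, i + 1 ≤ p) :
    bNewWord word nt ps i = word.getD i 0 :: bNewWord word nt ps (i+1) := by
  cases ps with
  | nil =>
    simp only [bNewWord]
    rw [List.drop_eq_getElem_cons hi, List.getD_eq_getElem word 0 hi]
  | cons p rest =>
    have hp : i + 1 ≤ p := hge p (by simp)
    have h1 : p - i = (p - (i+1)) + 1 := by omega
    simp only [bNewWord]
    rw [List.drop_eq_getElem_cons hi, h1, List.take_succ_cons,
      List.getD_eq_getElem word 0 hi]
    simp

-- A's loop from index i computes B's three passes over the positions from i.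
lemma main_lemma (word : List Int) (b1 b2 nt : Int) :
    ∀ fuel i, word.length - i ≤ fuel →
      aLoop word b1 b2 nt fuel i =
        (bNewWord word nt (bPositions word b1 b2 fuel i ((i : Int) - 2)) i,
         bPairs word b1 b2 nt (bPositions word b1 b2 fuel i ((i : Int) - 2))) := by
  intro fuel
  induction fuel with
  | zero =>
    intro i hm
    simp only [aLoop, bPositions, bNewWord, bPairs]
    rw [List.drop_eq_nil_of_le (by omega : word.length ≤ i)]
  | succ g ih =>
    intro i hm
    rw [aLoop]
    by_cases hi : i < word.length
    · rw [if_pos hi]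
      by_cases hmatch : i + 1 < word.length ∧ word.getD i 0 = b1 ∧ word.getD (i+1) 0 = b2
      · rw [if_pos hmatch]
        have hps : bPositions word b1 b2 (g+1) i ((i : Int) - 2)
            = i :: bPositions word b1 b2 g (i+2) (((i+2 : Nat) : Int) - 2) := by
          rw [bPositions, if_pos hmatch.1, if_pos ⟨by omega, hmatch.2⟩]
          congr 1
          cases g with
          | zero => omega
          | succ g' =>
            rw [bPositions]
            by_cases h2 : i + 2 < word.length
            · rw [if_pos (by omega : (i+1) + 1 < word.length), if_neg (by push_cast; omega)]
              rw [bPositions_fuel word b1 b2 g' (g'+1) (i+2) (i : Int) (by omega) (by omega)]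
              congr 1
              push_cast
              ring
            · rw [if_neg (by omega), bPositions_nil word b1 b2 _ (i+2) _ (by omega)]
        rw [hps, ih (i+2) (by omega)]
        simp only [bNewWord, bPairs]
        simp
      · rw [if_neg hmatch]
        have hps : bPositions word b1 b2 (g+1) i ((i : Int) - 2)
            = bPositions word b1 b2 g (i+1) (((i+1 : Nat) : Int) - 2) := by
          rw [bPositions]
          by_cases h1 : i + 1 < word.length
          · rw [if_pos h1, if_neg (by tauto)]
            exact bPositions_irrel word b1 b2 g (i+1) ((i : Int) - 2)
              (((i+1 : Nat) : Int) - 2) (by push_cast; omega) (by push_cast; omega)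
          · rw [if_neg h1, bPositions_nil word b1 b2 g (i+1) _ (by omega)]
        rw [hps, ih (i+1) (by omega)]
        have hge : ∀ p ∈ bPositions word b1 b2 g (i+1) (((i+1 : Nat) : Int) - 2), i + 1 ≤ p :=
          fun p hp => bPositions_ge word b1 b2 g (i+1) _ p hp
        rw [bNewWord_step word nt _ i hi hge]
    · rw [if_neg hi, bPositions_nil word b1 b2 (g+1) i _ (by omega)]
      simp only [bNewWord, bPairs]
      rw [List.drop_eq_nil_of_le (by omega : word.length ≤ i)]

-- ===== VERDICT (by name: the statement is the Claim_ definition above) =====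
theorem merge_word_with_index_py_spec : Claim_equal_merge_word_with_index_py := by
  intro word bp nt _
  unfold Spec_merge_word_with_index_py merge_word_with_index_py merge_word_with_index_py_alt
  have := main_lemma word bp.1 bp.2 nt word.length 0 (by omega)
  simpa using this
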